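-- pv_equiv track=rewrite | github.com/KyleBeyers/210CT_Coursework | adapted_binary_search.py | AdaptedBinarySearch
-- ===== SOURCE A (Python) =====
-- def AdaptedBinarySearch(a,l,h):
--     """Function to check if there are values within a given interval
--     using binary search"""
--     startVal = 0 #First element in list is index 0.
--     endVal = len(a)-1 #Last element is length - 1.
--     valInRange = False #value(s) not found yet so false.
--     while startVal <= endVal and not valInRange:
--         midVal = (startVal + endVal)//2
--         if a[midVal] >= l and a[midVal] <= h:
--             valInRange = True
--             #if value is in interval variable changed to true.
--         else:
--             if a[midVal] < l:
--                 startVal = midVal + 1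
--                 #if midpoint less than low value, midpoint and below
--                 #is removed
--             elif a[midVal] > h:
--                 endVal = midVal - 1
--                 #if midpoint is higher than high value, midpoint and
--                 #onwards is removed
--
--     return valInRange
-- ===== SOURCE B (Python) =====
-- def AdaptedBinarySearch(a, l, h):
--     """Recursive helper over (offset, width) of the current window instead of
--     A's lo/hi while-loop with a found flag; halving the width gives the same
--     midpoints in the same order."""
--     def go(s, w):
--         if w == 0:
--             return False
--         i = s + (w - 1) // 2
--         x = a[i]
--         if l <= x <= h:
--             return True
--         if x < l:
--             return go(i + 1, w // 2)
--         return go(s, (w - 1) // 2)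
--     return go(0, len(a))
-- ===== Notes on version B (the rewrite author's own statement) =====
-- stated objective: alternative
-- what changed: A's lo/hi while-loop carrying a found flag in mutable state is replaced by a recursive helper over the window's (offset, width) with early returns; widths are halved, visiting the same midpoints in the same order.
import Mathlib
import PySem

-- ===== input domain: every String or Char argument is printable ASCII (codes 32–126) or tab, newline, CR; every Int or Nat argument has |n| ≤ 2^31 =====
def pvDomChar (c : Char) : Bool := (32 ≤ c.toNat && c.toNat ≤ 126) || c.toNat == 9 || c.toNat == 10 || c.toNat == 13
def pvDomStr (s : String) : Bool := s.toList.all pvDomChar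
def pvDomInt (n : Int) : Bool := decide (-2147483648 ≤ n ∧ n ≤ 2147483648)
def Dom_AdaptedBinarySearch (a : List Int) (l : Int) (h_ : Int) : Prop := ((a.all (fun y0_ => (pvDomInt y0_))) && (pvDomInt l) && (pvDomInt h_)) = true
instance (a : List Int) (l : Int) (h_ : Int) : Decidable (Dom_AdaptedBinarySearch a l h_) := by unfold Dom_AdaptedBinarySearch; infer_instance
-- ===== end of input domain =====

-- B replaces A's lo/hi while-loop with a found flag by a recursive helper over the window's (offset, width) — same midpoints, same results: an alternative decomposition, not faster.


-- ===== PORT A =====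
-- A's while-loop as fuel-indexed structural recursion over the mutable state
-- (startVal, endVal, valInRange); the fuel a.length + 1 bounds the loop's trip
-- count (the interval [s, e] strictly shrinks each iteration from width a.length,
-- and once the flag is true the loop exits), so the fuel-0 arm is never reached
-- from the entry call — a totality guard only, not part of A's algorithm.
-- The final 'else' arm is Python's fall-through when neither 'if a[mid] < l' nor
-- 'elif a[mid] > h' fires; under the outer else it is exactly the 'a[mid] > h' case.
def pvLoopA (a : List Int) (l : Int) (h_ : Int) : Nat → Int → Int → Bool → Bool
  | 0, _, _, v => v
  | Nat.succ n, s, e, v =>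
    if s ≤ e ∧ v = false then
      let mid := PySem.Int.floordiv (s + e) 2
      let x := PySem.List.pyGetD a mid 0
      if x ≥ l ∧ x ≤ h_ then pvLoopA a l h_ n s e true
      else if x < l then pvLoopA a l h_ n (mid + 1) e v
      else pvLoopA a l h_ n s (mid - 1) v
    else v

def AdaptedBinarySearch (a : List Int) (l : Int) (h_ : Int) : Bool :=
  pvLoopA a l h_ (a.length + 1) 0 ((a.length : Int) - 1) false

-- ===== PORT B =====
-- B: recursive helper go(s, w) over the offset and Nat width of the current
-- window (from Source B); the width strictly shrinks, so the recursion is structural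
-- on w with no fuel. The index s + (w-1)/2 is in range (< a.length) on every
-- call reached from the entry (invariant s + w ≤ a.length), so a.getD · 0 is
-- exact for Python's a[i] there.
def pvGoB (a : List Int) (l : Int) (h_ : Int) : Nat → Nat → Bool
  | _, 0 => false
  | s, w + 1 =>
    let i := s + w / 2
    let x := a.getD i 0
    if l ≤ x ∧ x ≤ h_ then true
    else if x < l then pvGoB a l h_ (i + 1) ((w + 1) / 2)
    else pvGoB a l h_ s (w / 2)
termination_by _ w => w
decreasing_by all_goals omega

def AdaptedBinarySearch_alt (a : List Int) (l : Int) (h_ : Int) : Bool :=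
  pvGoB a l h_ 0 a.length

-- ===== PRECONDITION & SPEC =====
def Spec_AdaptedBinarySearch (a : List Int) (l : Int) (h_ : Int) (out : Bool) : Prop := out = AdaptedBinarySearch_alt a l h_
instance (a : List Int) (l : Int) (h_ : Int) (out : Bool) : Decidable (Spec_AdaptedBinarySearch a l h_ out) := by unfold Spec_AdaptedBinarySearch; infer_instance

-- ===== CLAIM (what is proved, stated in full; the proofs are below) =====
def Claim_equal_AdaptedBinarySearch : Prop := ∀ (a : List Int) (l : Int) (h_ : Int), Dom_AdaptedBinarySearch a l h_ → Spec_AdaptedBinarySearch a l h_ (AdaptedBinarySearch a l h_)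

-- ===== LEMMAS AND PROOFS =====
theorem pvLoopA_true (a : List Int) (l h_ : Int) (n : Nat) (s e : Int) :
    pvLoopA a l h_ n s e true = true := by
  cases n with
  | zero => rfl
  | succ n => unfold pvLoopA; simp

-- the mid-index bridge: A's Int midpoint is B's Nat offset s + w/2 (w = width - 1)
theorem pv_mid_eq (s w : Nat) :
    PySem.Int.floordiv ((s : Int) + ((s : Int) + (w + 1 : Nat) - 1)) 2 = ((s + w / 2 : Nat) : Int) := by
  have h : (s : Int) + ((s : Int) + ((w : Nat) + 1 : Nat) - 1) = ((2 * s + w : Nat) : Int) := by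
    push_cast; ring
  rw [h, show (2 : Int) = ((2 : Nat) : Int) from rfl, PySem.Int.floordiv_natCast]
  congr 1
  omega

-- core invariant: on a window [s, s+w) inside the list with enough fuel,
-- A's loop (flag still false) and B's helper agree
theorem pvLoopA_eq_pvGoB (a : List Int) (l h_ : Int) :
    ∀ (fuel : Nat) (s w : Nat), s + w ≤ a.length → w ≤ fuel →
      pvLoopA a l h_ fuel (s : Int) ((s : Int) + (w : Int) - 1) false = pvGoB a l h_ s w := by
  intro fuel
  induction fuel with
  | zero =>
      intro s w _ hw
      interval_cases w
      simp [pvLoopA, pvGoB]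
  | succ n ih =>
      intro s w hsw hw
      cases w with
      | zero =>
          unfold pvLoopA pvGoB
          rw [if_neg (by omega)]
      | succ w' =>
          unfold pvLoopA pvGoB
          rw [if_pos ⟨by push_cast; omega, rfl⟩]
          simp only [pv_mid_eq s w']
          have hi : s + w' / 2 < a.length := by omega
          rw [show PySem.List.pyGetD a ((s + w' / 2 : Nat) : Int) 0 = a.getD (s + w' / 2) 0 from
            PySem.List.pyGetD_natCast a _ 0]
          set x := a.getD (s + w' / 2) 0 with hx
          by_cases hin : l ≤ x ∧ x ≤ h_
          · rw [if_pos ⟨hin.1, hin.2⟩, if_pos hin, pvLoopA_true]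
          · rw [if_neg (by exact fun ⟨h1, h2⟩ => hin ⟨h1, h2⟩), if_neg hin]
            by_cases hlt : x < l
            · rw [if_pos hlt, if_pos hlt]
              have := ih (s + w' / 2 + 1) ((w' + 1) / 2) (by omega) (by omega)
              have harg : ((s + w' / 2 : Nat) : Int) + 1 = ((s + w' / 2 + 1 : Nat) : Int) := by push_cast; ring
              have harg2 : (s : Int) + ((w' : Nat) + 1 : Nat) - 1 = ((s + w' / 2 + 1 : Nat) : Int) + (((w' + 1) / 2 : Nat) : Int) - 1 := by
                push_cast; omega
              rw [harg, harg2] at *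
              exact this
            · rw [if_neg hlt, if_neg hlt]
              have := ih s (w' / 2) (by omega) (by omega)
              have harg : ((s + w' / 2 : Nat) : Int) - 1 = (s : Int) + ((w' / 2 : Nat) : Int) - 1 := by
                push_cast; omega
              rw [harg]
              exact this

-- ===== VERDICT (by name: the statement is the Claim_ definition above) =====
theorem AdaptedBinarySearch_spec : Claim_equal_AdaptedBinarySearch := by
  intro a l h_ _
  unfold Spec_AdaptedBinarySearch AdaptedBinarySearch AdaptedBinarySearch_alt
  have := pvLoopA_eq_pvGoB a l h_ (a.length + 1) 0 a.length (by omega) (by omega)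
  simpa using this
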